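-- pv_equiv track=rewrite | github.com/AFDWang/Hetu-Galvatron | galvatron/core/profiler/hardware_profiler.py | generate_allreduce_groups
-- ===== SOURCE A (Python) =====
-- from typing import List, Tuple, Union
--
-- def generate_allreduce_groups(
--     world_size: int, allreduce_size: int, allreduce_consec: bool
-- ) -> List[List[int]]:
--     """Generate groups for allreduce communication
--
--     Args:
--         world_size: Total number of processes
--         allreduce_size: Size of each allreduce group
--         allreduce_consec: Whether to use consecutive GPU mapping
--
--     Returns:
--         List[List[int]]: List of process groups for allreduce
--     """
--     allreduce_size = int(allreduce_size)
--     num_allreduce_groups = int(world_size // allreduce_size)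
--     allreduce_groups = []
--     for i in range(num_allreduce_groups):
--         if allreduce_consec:
--             ranks = list(range(i * allreduce_size, (i + 1) * allreduce_size))
--         else:
--             ranks = list(range(i, world_size, num_allreduce_groups))
--         allreduce_groups.append(ranks)
--     return allreduce_groups
-- ===== SOURCE B (Python) =====
-- def generate_allreduce_groups(world_size, allreduce_size, allreduce_consec):
--     allreduce_size = int(allreduce_size)
--     num_allreduce_groups = int(world_size // allreduce_size)
--     if num_allreduce_groups <= 0:
--         return []
--     groups = [[] for _ in range(num_allreduce_groups)]
--     if allreduce_consec:
--         for r in range(num_allreduce_groups * allreduce_size):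
--             groups[r // allreduce_size].append(r)
--     else:
--         for r in range(world_size):
--             groups[r % num_allreduce_groups].append(r)
--     return groups
-- ===== Notes on version B (the rewrite author's own statement) =====
-- stated objective: alternative
-- what changed: A builds each group's rank list one group at a time (a fresh range per group); B pre-allocates num_groups empty lists and scatters each rank once into its group by closed-form index (r//allreduce_size consecutive, r%num_groups strided).
import Mathlib
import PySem

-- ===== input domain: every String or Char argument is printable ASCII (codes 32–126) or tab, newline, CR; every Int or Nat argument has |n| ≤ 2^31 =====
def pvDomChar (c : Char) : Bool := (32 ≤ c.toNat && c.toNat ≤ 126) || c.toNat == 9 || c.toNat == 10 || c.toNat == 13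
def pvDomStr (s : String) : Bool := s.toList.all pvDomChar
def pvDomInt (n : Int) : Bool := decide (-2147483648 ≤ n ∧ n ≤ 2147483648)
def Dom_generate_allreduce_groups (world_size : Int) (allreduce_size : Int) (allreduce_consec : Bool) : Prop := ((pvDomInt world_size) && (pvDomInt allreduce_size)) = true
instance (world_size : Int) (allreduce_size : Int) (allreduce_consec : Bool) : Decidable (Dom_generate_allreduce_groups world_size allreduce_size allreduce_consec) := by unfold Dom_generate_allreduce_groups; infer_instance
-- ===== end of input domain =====

-- B replaces A's per-group range construction with a per-rank scatter into pre-allocated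
-- groups (alternative decomposition, same cost); return values agree whenever A returns.

-- ===== PORT A =====
-- literal port of A: build each group's rank list, one group at a time
def generate_allreduce_groups (world_size : Int) (allreduce_size : Int) (allreduce_consec : Bool) : List (List Int) :=
  let num_allreduce_groups : Int := PySem.Int.floordiv world_size allreduce_size
  (PySem.List.pyRange 0 num_allreduce_groups 1).foldl
    (fun allreduce_groups i =>
      allreduce_groups ++
        [if allreduce_consec then
            PySem.List.pyRange (i * allreduce_size) ((i + 1) * allreduce_size) 1
          else
            PySem.List.pyRange i world_size num_allreduce_groups])
    []

-- ===== PORT B =====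
-- groups[n].append(r), leaving the list unchanged if n is out of range (B never hits that case)
def pvAppendAt : List (List Int) → Nat → Int → List (List Int)
  | [], _, _ => []
  | g :: gs, 0, r => (g ++ [r]) :: gs
  | g :: gs, n + 1, r => g :: pvAppendAt gs n r

-- literal port of B: pre-allocate empty groups, scatter each rank into its group
def generate_allreduce_groups_alt (world_size : Int) (allreduce_size : Int) (allreduce_consec : Bool) : List (List Int) :=
  let num : Int := PySem.Int.floordiv world_size allreduce_size
  if num ≤ 0 then []
  else
    let groups : List (List Int) := List.replicate num.toNat []
    if allreduce_consec then
      (PySem.List.pyRange 0 (num * allreduce_size) 1).foldl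
        (fun gs r => pvAppendAt gs (PySem.Int.floordiv r allreduce_size).toNat r) groups
    else
      (PySem.List.pyRange 0 world_size 1).foldl
        (fun gs r => pvAppendAt gs (PySem.Int.mod r num).toNat r) groups

-- ===== PRECONDITION & SPEC =====
-- Pre_ excludes only allreduce_size = 0, on which A raises ZeroDivisionError.
def Pre_generate_allreduce_groups (world_size : Int) (allreduce_size : Int) (allreduce_consec : Bool) : Prop :=
  allreduce_size ≠ 0
instance (world_size : Int) (allreduce_size : Int) (allreduce_consec : Bool) : Decidable (Pre_generate_allreduce_groups world_size allreduce_size allreduce_consec) := by unfold Pre_generate_allreduce_groups; infer_instance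

def pvWitness_generate_allreduce_groups : Int × Int × Bool := (8, 2, true)

def Spec_generate_allreduce_groups (world_size : Int) (allreduce_size : Int) (allreduce_consec : Bool) (out : List (List Int)) : Prop := out = generate_allreduce_groups_alt world_size allreduce_size allreduce_consec
instance (world_size : Int) (allreduce_size : Int) (allreduce_consec : Bool) (out : List (List Int)) : Decidable (Spec_generate_allreduce_groups world_size allreduce_size allreduce_consec out) := by unfold Spec_generate_allreduce_groups; infer_instance

-- ===== CLAIM (what is proved, stated in full; the proofs are below) =====
def Claim_equal_generate_allreduce_groups : Prop := ∀ (world_size : Int) (allreduce_size : Int) (allreduce_consec : Bool), Dom_generate_allreduce_groups world_size allreduce_size allreduce_consec → Pre_generate_allreduce_groups world_size allreduce_size allreduce_consec → Spec_generate_allreduce_groups world_size allreduce_size allreduce_consec (generate_allreduce_groups world_size allreduce_size allreduce_consec)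

-- ===== LEMMAS AND PROOFS =====

theorem pv_sorted_ext (l1 l2 : List Int) (h1 : l1.Pairwise (· < ·)) (h2 : l2.Pairwise (· < ·))
    (h : ∀ x, x ∈ l1 ↔ x ∈ l2) : l1 = l2 := by
  have n1 : l1.Nodup := h1.nodup
  have n2 : l2.Nodup := h2.nodup
  have p : l1.Perm l2 := List.perm_of_nodup_nodup_toFinset_eq n1 n2 (by
    ext x; simp [List.mem_toFinset, h x])
  exact p.eq_of_pairwise (fun a b _ _ hab hba => le_antisymm hab hba)
    (h1.imp le_of_lt) (h2.imp le_of_lt)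

theorem pv_mapIdx_id (G : List (List Int)) : List.mapIdx (fun _ g => g) G = G := by
  induction G with
  | nil => simp
  | cons g gs ih => simpa [List.mapIdx_cons] using ih

theorem pv_mapIdx_appendAt (G : List (List Int)) (k : Nat) (a : Int) (h : Nat → List Int) :
    (pvAppendAt G k a).mapIdx (fun i g => g ++ h i)
      = G.mapIdx (fun i g => g ++ (if k = i then a :: h i else h i)) := by
  induction G generalizing k h with
  | nil => simp [pvAppendAt]
  | cons g gs ih =>
    cases k with
    | zero => simp [pvAppendAt, List.mapIdx_cons]
    | succ k =>
      simp only [pvAppendAt, List.mapIdx_cons, ih k (fun i => h (i + 1))]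
      refine congrArg₂ _ (by simp) ?_
      congr 1
      funext i g
      simp

theorem pv_scatter_eq (L : List Int) (G : List (List Int)) (f : Int → Nat) :
    L.foldl (fun gs r => pvAppendAt gs (f r) r) G
      = G.mapIdx (fun i g => g ++ L.filter (fun r => f r = i)) := by
  induction L generalizing G with
  | nil => simpa using (pv_mapIdx_id G).symm
  | cons a L ih =>
    simp only [List.foldl_cons, ih, pv_mapIdx_appendAt]
    congr 1
    funext i g
    by_cases hfa : f a = i <;> simp [hfa]

theorem pv_mapIdx_replicate (m : Nat) (h : Nat → List Int) :
    (List.replicate m ([] : List Int)).mapIdx (fun i g => g ++ h i)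
      = (List.range m).map h := by
  induction m generalizing h with
  | zero => simp
  | succ m ih =>
    rw [List.replicate_succ, List.mapIdx_cons, List.range_succ_eq_map, List.map_cons,
      List.map_map]
    refine congrArg₂ _ (by simp) ?_
    rw [ih (fun i => h (i + 1))]
    rfl

-- consecutive case: the ranks scattered into group k are exactly A's k-th block
theorem pv_consec_filter (as num : Int) (has : 0 < as) (k : Nat) (hk : (k : Int) < num) :
    (PySem.List.pyRange 0 (num * as) 1).filter
        (fun r => (PySem.Int.floordiv r as).toNat = k)
      = PySem.List.pyRange ((k : Int) * as) (((k : Int) + 1) * as) 1 := by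
  apply pv_sorted_ext
  · exact (PySem.List.pairwise_lt_pyRange_one 0 (num * as)).filter _
  · exact PySem.List.pairwise_lt_pyRange_one _ _
  · intro x
    simp only [List.mem_filter, PySem.List.mem_pyRange_one, decide_eq_true_eq]
    constructor
    · rintro ⟨⟨hx0, hxn⟩, hf⟩
      have hnn : 0 ≤ PySem.Int.floordiv x as :=
        (PySem.Int.le_floordiv_iff_mul_le has).mpr (by simpa using hx0)
      have : PySem.Int.floordiv x as = (k : Int) := by omega
      have := (PySem.Int.floordiv_eq_iff_of_pos has).mp this
      exact ⟨this.1, this.2⟩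
    · rintro ⟨h1, h2⟩
      have hx0 : (0 : Int) ≤ x := le_trans (mul_nonneg (by positivity) (le_of_lt has)) h1
      have hxn : x < num * as := lt_of_lt_of_le h2 (by
        apply mul_le_mul_of_nonneg_right _ (le_of_lt has); omega)
      have hfd : PySem.Int.floordiv x as = (k : Int) :=
        (PySem.Int.floordiv_eq_iff_of_pos has).mpr ⟨h1, h2⟩
      refine ⟨⟨hx0, hxn⟩, by omega⟩

-- pyRange with a positive step is strictly increasing
theorem pv_pairwise_pyRange_pos (a b s : Int) (hs : 0 < s) :
    (PySem.List.pyRange a b s).Pairwise (· < ·) := by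
  rw [PySem.List.pyRange_of_pos a b hs]
  refine List.Pairwise.map _ ?_ (List.pairwise_lt_range)
  intro i j hij
  have : s * (i : Int) < s * (j : Int) := by
    apply mul_lt_mul_of_pos_left _ hs; exact_mod_cast hij
  omega

-- strided case: the ranks scattered into group k are exactly A's strided range
theorem pv_strided_filter (ws num : Int) (hnum : 0 < num) (k : Nat) (hk : (k : Int) < num) :
    (PySem.List.pyRange 0 ws 1).filter (fun r => (PySem.Int.mod r num).toNat = k)
      = PySem.List.pyRange (k : Int) ws num := by
  apply pv_sorted_ext
  · exact (PySem.List.pairwise_lt_pyRange_one 0 ws).filter _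
  · exact pv_pairwise_pyRange_pos _ _ _ hnum
  · intro x
    simp only [List.mem_filter, PySem.List.mem_pyRange_one, decide_eq_true_eq,
      PySem.List.mem_pyRange_iff_of_pos hnum]
    constructor
    · rintro ⟨⟨hx0, hxw⟩, hf⟩
      have hm0 : 0 ≤ PySem.Int.mod x num := PySem.Int.mod_nonneg x hnum
      have hme : PySem.Int.mod x num = (k : Int) := by omega
      rw [PySem.Int.mod_eq_emod_of_pos hnum] at hme
      have hdvd : num ∣ x - (k : Int) := by
        apply Int.dvd_of_emod_eq_zero
        rw [Int.sub_emod, hme]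
        simp
      refine ⟨?_, hxw, hdvd⟩
      obtain ⟨c, hc⟩ := hdvd
      rcases le_or_gt (0 : Int) c with hc0 | hc0
      · nlinarith
      · exfalso
        have hc1 : c ≤ -1 := by omega
        have : x - (k : Int) ≤ -num := by
          calc x - (k : Int) = num * c := hc
            _ ≤ num * (-1) := by apply mul_le_mul_of_nonneg_left hc1 (le_of_lt hnum)
            _ = -num := by ring
        omega
    · rintro ⟨hkx, hxw, hdvd⟩
      have hx0 : (0 : Int) ≤ x := le_trans (by positivity) hkx
      have hme : x % num = (k : Int) := by
        obtain ⟨c, hc⟩ := hdvd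
        have hx : x = (k : Int) + num * c := by omega
        rw [hx, Int.add_mul_emod_self_left]
        exact Int.emod_eq_of_lt (by positivity) hk
      have : PySem.Int.mod x num = (k : Int) := by
        rw [PySem.Int.mod_eq_emod_of_pos hnum]; exact hme
      exact ⟨⟨hx0, hxw⟩, by omega⟩

-- ===== VERDICT (by name: the statement is the Claim_ definition above) =====
theorem generate_allreduce_groups_spec : Claim_equal_generate_allreduce_groups := by
  intro ws as c _ hpre
  unfold Spec_generate_allreduce_groups
  show generate_allreduce_groups ws as c = _
  simp only [generate_allreduce_groups, generate_allreduce_groups_alt]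
  by_cases hnum : PySem.Int.floordiv ws as ≤ 0
  · rw [if_pos hnum, PySem.List.pyRange_one_eq_nil hnum]
    simp
  · rw [not_le] at hnum
    rw [if_neg (by omega)]
    rw [PySem.List.foldl_append_singleton_eq_map, List.nil_append]
    have hcast : PySem.Int.floordiv ws as = (((PySem.Int.floordiv ws as).toNat : Int)) := by
      omega
    rw [hcast, PySem.List.pyRange_zero_natCast, List.map_map]
    cases c with
    | true =>
      simp only [if_true, pv_scatter_eq, pv_mapIdx_replicate]
      apply List.map_congr_left
      intro k hk
      rw [List.mem_range] at hk
      simp only [Function.comp_apply]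
      rcases lt_or_gt_of_ne hpre with has | has
      · -- allreduce_size < 0: every block and the whole scatter range are empty
        have h1 : PySem.List.pyRange ((k : Int) * as) (((k : Int) + 1) * as) 1 = [] :=
          PySem.List.pyRange_one_eq_nil (by nlinarith)
        have h2 : PySem.List.pyRange 0 ((((PySem.Int.floordiv ws as).toNat : Nat) : Int) * as) 1
            = [] :=
          PySem.List.pyRange_one_eq_nil (by nlinarith [Int.toNat_of_nonneg (le_of_lt hnum)])
        rw [h1, h2, List.filter_nil]
      · exact (pv_consec_filter as (((PySem.Int.floordiv ws as).toNat : Int)) has k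
          (by exact_mod_cast hk)).symm
    | false =>
      simp only [Bool.false_eq_true, if_false, pv_scatter_eq, pv_mapIdx_replicate]
      apply List.map_congr_left
      intro k hk
      rw [List.mem_range] at hk
      simp only [Function.comp_apply]
      exact (pv_strided_filter ws (((PySem.Int.floordiv ws as).toNat : Int)) (by omega) k
        (by exact_mod_cast hk)).symm
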